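-- pv_equiv track=rewrite | github.com/ji4866/Algorithm | 프로그래머스/0/120850. 문자열 정렬하기 （1）/문자열 정렬하기 （1）.py | solution
-- ===== SOURCE A (Python) =====
-- def solution(my_string):
--     answer = []
--
--     for s in my_string:
--         try:
--             answer.append(int(s))
--         except:
--             continue
--
--     return sorted(answer)
-- ===== SOURCE B (Python) =====
-- def solution(my_string):
--     counts = [my_string.count(d) for d in "0123456789"]
--     answer = []
--     for value in range(10):
--         answer += [value] * counts[value]
--     return answer
-- ===== Notes on version B (the rewrite author's own statement) =====
-- stated objective: faster
-- what changed: Replaces the per-character int() filter and comparison sort by a counting sort over the fixed digit alphabet: one str.count per digit value 0..9 fills a counts list and the sorted answer is emitted by iterating digit values in increasing order.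
import Mathlib
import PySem

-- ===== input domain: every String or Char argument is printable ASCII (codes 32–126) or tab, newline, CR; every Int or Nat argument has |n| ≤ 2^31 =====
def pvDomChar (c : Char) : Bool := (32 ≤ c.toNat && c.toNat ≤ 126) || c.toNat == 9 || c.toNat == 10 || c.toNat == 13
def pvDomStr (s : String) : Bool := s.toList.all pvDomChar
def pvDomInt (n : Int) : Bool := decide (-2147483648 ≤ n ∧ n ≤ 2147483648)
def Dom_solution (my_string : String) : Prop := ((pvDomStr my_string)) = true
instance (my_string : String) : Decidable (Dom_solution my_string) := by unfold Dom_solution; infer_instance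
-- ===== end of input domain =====

-- B replaces A's per-char int() filter + comparison sort by a counting sort: one str.count
-- per digit value 0..9, then the answer emitted in increasing digit order (objective: faster).

-- ===== PORT A =====
-- answer = []; for s in my_string: try answer.append(int(s)) except continue; return sorted(answer)
def solution (my_string : String) : List Int :=
  let answer := my_string.toList.foldl (fun ans c =>
    match PySem.Int.ofChars? [c] with   -- int(s); ValueError swallowed by except: continue
    | some n => ans ++ [n]
    | none => ans) []
  PySem.List.sorted answer (fun x => x) false

-- ===== PORT B =====
-- counts = [my_string.count(d) for d in "0123456789"]
-- answer = []; for value in range(10): answer += [value] * counts[value]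
-- (counts[value]: value ∈ [0,10) and len(counts) = 10, so the index is always in range)
def solution_alt (my_string : String) : List Int :=
  let counts := ("0123456789".toList).map
    (fun d => ((PySem.Str.count my_string (String.ofList [d]) : Nat) : Int))
  (PySem.List.pyRange 0 10 1).foldl (fun ans v =>
    ans ++ PySem.List.pyRepeat [v] (counts.getD v.toNat 0)) []

-- ===== PRECONDITION & SPEC =====
def Spec_solution (my_string : String) (out : List Int) : Prop := out = solution_alt my_string
instance (my_string : String) (out : List Int) : Decidable (Spec_solution my_string out) := by unfold Spec_solution; infer_instance

-- ===== CLAIM (what is proved, stated in full; the proofs are below) =====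
def Claim_equal_solution : Prop := ∀ (my_string : String), Dom_solution my_string → Spec_solution my_string (solution my_string)

-- ===== LEMMAS AND PROOFS =====

-- int(c) for a single char of code ≤ 126: digit value for '0'..'9', else ValueError
theorem ofChars_single (c : Char) (h : c.toNat ≤ 126) :
    PySem.Int.ofChars? [c] = if 48 ≤ c.toNat ∧ c.toNat ≤ 57 then some ((c.toNat : Int) - 48) else none := by
  have key : ∀ m : Fin 127, PySem.Int.ofChars? [Char.ofNat m.val] =
      if 48 ≤ m.val ∧ m.val ≤ 57 then some ((m.val : Int) - 48) else none := by decide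
  have := key ⟨c.toNat, by omega⟩
  simpa [Char.ofNat_toNat] using this

-- the digit list A collects, as a flatMap
def digitsOf (cs : List Char) : List Int :=
  cs.flatMap (fun c => match PySem.Int.ofChars? [c] with | some n => [n] | none => [])

theorem digitsOf_cons (c : Char) (cs : List Char) :
    digitsOf (c :: cs) = (match PySem.Int.ofChars? [c] with | some n => [n] | none => []) ++ digitsOf cs := rfl

theorem digits_mem (cs : List Char) (hd : ∀ c ∈ cs, pvDomChar c = true) :
    ∀ x ∈ digitsOf cs, 0 ≤ x ∧ x < 10 := by
  intro x hx
  simp only [digitsOf, List.mem_flatMap] at hx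
  obtain ⟨c, hc, hx⟩ := hx
  have hle : c.toNat ≤ 126 := by
    have := hd c hc; simp [pvDomChar] at this; omega
  rw [ofChars_single c hle] at hx
  by_cases hdig : 48 ≤ c.toNat ∧ c.toNat ≤ 57
  · rw [if_pos hdig] at hx; simp at hx; omega
  · rw [if_neg hdig] at hx; simp at hx

-- s.count(d) for a single-char needle counts occurrences of that char
theorem count_go_single (c : Char) : ∀ (l : List Char) (fuel acc : Nat), l.length ≤ fuel →
    PySem.Chars.count.go [c] fuel l acc = acc + l.count c := by
  intro l
  induction l with
  | nil => intro fuel acc h; cases fuel <;> simp [PySem.Chars.count.go]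
  | cons a t ih =>
    intro fuel acc h
    cases fuel with
    | zero => simp at h
    | succ f =>
      rw [PySem.Chars.count.go]
      simp only [List.isPrefixOf_cons₂, List.isPrefixOf_nil_left, Bool.and_true, List.count_cons]
      by_cases he : c = a
      · rw [if_pos (by simp [he])]
        simp only [List.length_singleton, List.drop_one, List.tail_cons]
        rw [ih f (acc + 1) (by simpa using h)]
        simp [he]
        omega
      · rw [if_neg (by simp [he])]
        rw [ih f acc (by simpa using h)]
        simp [Ne.symm he]

theorem chars_count_single (l : List Char) (c : Char) : PySem.Chars.count l [c] = l.count c := by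
  rw [PySem.Chars.count]
  simp only [List.isEmpty_cons, if_false, Bool.false_eq_true]
  rw [count_go_single c l l.length 0 le_rfl, Nat.zero_add]

-- in the printable-ASCII domain, A keeps a digit of value v exactly at the chars '0'+v
theorem digits_count (cs : List Char) (hd : ∀ c ∈ cs, pvDomChar c = true) (v : Nat) (hv : v < 10) :
    (digitsOf cs).count (v : Int) = cs.count (Char.ofNat (48 + v)) := by
  have hD : (Char.ofNat (48 + v)).toNat = 48 + v := by interval_cases v <;> decide
  induction cs with
  | nil => rfl
  | cons c cs ih =>
    have hle : c.toNat ≤ 126 := by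
      have := hd c (by simp); simp [pvDomChar] at this; omega
    rw [digitsOf_cons, List.count_append, List.count_cons, ih (fun c hc => hd c (by simp [hc]))]
    rw [ofChars_single c hle]
    by_cases hdig : 48 ≤ c.toNat ∧ c.toNat ≤ 57
    · rw [if_pos hdig]
      by_cases he : c.toNat = 48 + v
      · have hc : c = Char.ofNat (48 + v) := by rw [← he, Char.ofNat_toNat]
        have hcv : ((Char.ofNat (48 + v)).toNat : Int) - 48 = (v : Int) := by
          rw [hD]; push_cast; ring
        rw [hc, hcv]
        simp [Nat.add_comm]
      · have hc : c ≠ Char.ofNat (48 + v) := fun h => he (by rw [h, hD])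
        have : ¬ ((c.toNat : Int) - 48 = (v : Int)) := by omega
        simp [this, hc]
    · rw [if_neg hdig]
      have hc : c ≠ Char.ofNat (48 + v) := fun h => hdig (by rw [h, hD]; omega)
      simp [hc]

-- replicate blocks over an ≤-ordered value list are ≤-ordered
theorem blocks_pairwise (g : Int → Nat) (vs : List Int) (h : vs.Pairwise (· ≤ ·)) :
    (vs.flatMap (fun v => List.replicate (g v) v)).Pairwise (fun a b => a ≤ b) := by
  induction vs with
  | nil => simp
  | cons v vs ih =>
    rw [List.pairwise_cons] at h
    simp only [List.flatMap_cons]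
    rw [List.pairwise_append]
    refine ⟨List.pairwise_replicate.mpr (Or.inr le_rfl), ih h.2, ?_⟩
    intro a ha b hb
    rw [List.eq_of_mem_replicate ha]
    simp only [List.mem_flatMap] at hb
    obtain ⟨w, hw, hb⟩ := hb
    rw [List.eq_of_mem_replicate hb]
    exact h.1 w hw

theorem blocks_count (g : Int → Nat) (vs : List Int) (hnd : vs.Nodup) (x : Int) :
    (vs.flatMap (fun v => List.replicate (g v) v)).count x = if x ∈ vs then g x else 0 := by
  induction vs with
  | nil => simp
  | cons v vs ih =>
    simp only [List.flatMap_cons, List.count_append, List.count_replicate, ih hnd.of_cons,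
      List.mem_cons]
    rcases eq_or_ne x v with rfl | hne
    · simp [(List.nodup_cons.mp hnd).1]
    · simp [hne, Ne.symm hne]

-- B's output is the digit-count replicate blocks for values 0..9
theorem solution_alt_eq (my_string : String) (hd : Dom_solution my_string) :
    solution_alt my_string =
      ([0,1,2,3,4,5,6,7,8,9] : List Int).flatMap
        (fun v => List.replicate ((digitsOf my_string.toList).count v) v) := by
  have hdc : ∀ c ∈ my_string.toList, pvDomChar c = true := by
    simpa [Dom_solution, pvDomStr, List.all_eq_true] using hd
  unfold solution_alt
  have hR : PySem.List.pyRange 0 10 1 = [0,1,2,3,4,5,6,7,8,9] := by decide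
  rw [hR]
  have hs : ("0123456789".toList) = ['0','1','2','3','4','5','6','7','8','9'] := by decide
  rw [hs]
  have key : ∀ d : Char, ((PySem.Str.count my_string (String.ofList [d]) : Nat) : Int)
      = ((my_string.toList.count d : Nat) : Int) := by
    intro d
    rw [PySem.Str.count_eq, String.toList_ofList, chars_count_single]
  simp only [List.map_cons, List.map_nil, key]
  simp only [PySem.List.pyRepeat_singleton]
  rw [PySem.List.foldl_append_eq_flatMap, List.nil_append]
  apply List.flatMap_congr
  intro v hv
  congr 1
  fin_cases hv
  all_goals norm_num [List.getD]
  all_goals first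
    | simpa using (digits_count my_string.toList hdc 0 (by omega)).symm
    | simpa using (digits_count my_string.toList hdc 1 (by omega)).symm
    | simpa using (digits_count my_string.toList hdc 2 (by omega)).symm
    | simpa using (digits_count my_string.toList hdc 3 (by omega)).symm
    | simpa using (digits_count my_string.toList hdc 4 (by omega)).symm
    | simpa using (digits_count my_string.toList hdc 5 (by omega)).symm
    | simpa using (digits_count my_string.toList hdc 6 (by omega)).symm
    | simpa using (digits_count my_string.toList hdc 7 (by omega)).symm
    | simpa using (digits_count my_string.toList hdc 8 (by omega)).symm
    | simpa using (digits_count my_string.toList hdc 9 (by omega)).symm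

-- ===== VERDICT (by name: the statement is the Claim_ definition above) =====
theorem solution_spec : Claim_equal_solution := by
  intro s hd
  unfold Spec_solution
  have hdc : ∀ c ∈ s.toList, pvDomChar c = true := by
    simpa [Dom_solution, pvDomStr, List.all_eq_true] using hd
  unfold solution
  have hfun : (fun (ans : List Int) (c : Char) =>
      match PySem.Int.ofChars? [c] with | some n => ans ++ [n] | none => ans)
    = (fun ans c => ans ++ (match PySem.Int.ofChars? [c] with | some n => [n] | none => [])) := by
    funext ans c; cases PySem.Int.ofChars? [c] <;> simp
  simp only [hfun]
  rw [PySem.List.foldl_append_eq_flatMap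
        (fun c => match PySem.Int.ofChars? [c] with | some n => [n] | none => []) s.toList [],
      List.nil_append]
  rw [solution_alt_eq s hd]
  apply PySem.List.sorted_id_eq_of_perm_of_pairwise
  · rw [List.perm_iff_count]
    intro x
    rw [blocks_count _ _ (by decide) x]
    by_cases hx : x ∈ ([0,1,2,3,4,5,6,7,8,9] : List Int)
    · rw [if_pos hx]; rfl
    · rw [if_neg hx]
      symm
      rw [List.count_eq_zero]
      intro hmem
      have := digits_mem s.toList hdc x hmem
      apply hx
      have hx0 : x = (0:Int) ∨ x = 1 ∨ x = 2 ∨ x = 3 ∨ x = 4 ∨ x = 5 ∨ x = 6 ∨ x = 7 ∨ x = 8 ∨ x = 9 := by omega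
      rcases hx0 with h|h|h|h|h|h|h|h|h|h <;> simp [h]
  · exact blocks_pairwise _ _ (by decide)
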